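-- pv_equiv track=rewrite | github.com/mainak-cmd/moca_test | main.py | delayed_recall_test
-- ===== SOURCE A (Python) =====
-- def delayed_recall_test(answer_new):
--     value = [string.lower().strip() for string in answer_new]
--     list_1 = []
--     list_2 = []
--     list_3 = []
--     j = 0
--     result_dict = {}
--     text = ["banana", "milk", "deer"]
--
--     for index, i in enumerate(value):
--         if i in text:
--             list_1.append(i)
--             list_2.append(index)
--         else:
--             list_3.append("not in list")
--
--     try:
--         for i in range(len(list_2)):
--             result_dict[list_2[i]] = list_1[i]
--         for i in result_dict.keys():
--             if value[i] == text[i]: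
--                 j += 1
--         score7 = j
--         return score7
--     except TypeError:
--         return 0
-- ===== SOURCE B (Python) =====
-- def delayed_recall_test(answer_new):
--     # Score = number of positions i (over the first three) where the
--     # normalised recalled word equals the expected word at that position.
--     expected = ["banana", "milk", "deer"]
--     return sum(1 for w, t in zip(answer_new, expected) if w.lower().strip() == t)
-- ===== Notes on version B (the rewrite author's own statement) =====
-- stated objective: simpler
-- what changed: A's three stages (filter value into parallel lists list_1/list_2, rebuild an index->word dict over a range loop, then re-scan the dict keys comparing value[i] to text[i]) are collapsed into one fold over zip(answer_new, expected) that counts positions whose normalised word equals the expected word.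
import Mathlib
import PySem

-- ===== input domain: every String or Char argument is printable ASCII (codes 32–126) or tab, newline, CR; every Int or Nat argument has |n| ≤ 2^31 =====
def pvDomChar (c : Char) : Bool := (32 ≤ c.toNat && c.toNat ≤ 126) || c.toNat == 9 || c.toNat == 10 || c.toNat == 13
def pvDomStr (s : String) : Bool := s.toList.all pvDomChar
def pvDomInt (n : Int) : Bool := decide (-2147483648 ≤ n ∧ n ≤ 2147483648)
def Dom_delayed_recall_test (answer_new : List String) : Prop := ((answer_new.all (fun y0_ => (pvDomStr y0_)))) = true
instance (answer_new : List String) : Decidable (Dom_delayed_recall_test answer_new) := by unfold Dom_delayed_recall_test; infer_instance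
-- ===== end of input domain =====

-- B replaces A's three-stage pipeline (filter into parallel lists, rebuild an index→word dict, re-scan its keys)
-- by a single fold over zip(answer_new, expected): simpler. A raises IndexError when a recalled word at index ≥ 3
-- normalises into the expected list; those inputs are excluded by Pre_ (B simply returns the score over the first three positions there).

-- ===== PORT A =====
def drtText : List String := ["banana", "milk", "deer"]

-- body of 'for index, i in enumerate(value): …'
def drtLoop1 (st : List String × List Int × List String) (p : Int × String) :
    List String × List Int × List String :=
  if p.2 ∈ drtText then (st.1 ++ [p.2], st.2.1 ++ [p.1], st.2.2)
  else (st.1, st.2.1, st.2.2 ++ ["not in list"])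

-- body of 'if value[i] == text[i]: j += 1'; the none branches are Python's IndexError (excluded by Pre_)
def drtStep (value : List String) (j : Int) (i : Int) : Int :=
  match PySem.List.pyGet? value i, PySem.List.pyGet? drtText i with
  | some a, some b => if a = b then j + 1 else j
  | _, _ => j

def delayed_recall_test (answer_new : List String) : Int :=
  let value := answer_new.map (fun s => PySem.Str.strip (PySem.Str.lower s))
  let st := (PySem.List.enumerate value 0).foldl drtLoop1 ([], [], [])
  let list_1 := st.1
  let list_2 := st.2.1
  let result_dict := (PySem.List.pyRange 0 (list_2.length : Int) 1).foldl
      (fun (d : PySem.Dict Int String) i =>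
        d.insert (PySem.List.pyGetD list_2 i 0) (PySem.List.pyGetD list_1 i "")) PySem.Dict.empty
  result_dict.keys.foldl (drtStep value) 0

-- ===== PORT B =====
def delayed_recall_test_alt (answer_new : List String) : Int :=
  (List.zip answer_new ["banana", "milk", "deer"]).foldl
    (fun acc p => if PySem.Str.strip (PySem.Str.lower p.1) = p.2 then acc + 1 else acc) 0

-- ===== PRECONDITION & SPEC =====
-- Pre_ excludes exactly the inputs on which A raises IndexError: a word at index ≥ 3 whose
-- lower().strip() normalisation is one of the three expected words ("text[i]" is then out of range).
def Pre_delayed_recall_test (answer_new : List String) : Prop :=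
  ∀ s ∈ answer_new.drop 3,
    PySem.Str.strip (PySem.Str.lower s) ∉ (["banana", "milk", "deer"] : List String)
instance (answer_new : List String) : Decidable (Pre_delayed_recall_test answer_new) := by
  unfold Pre_delayed_recall_test; infer_instance
def pvWitness_delayed_recall_test : List String := ["banana", "MILK ", "x", "deer?"]

def Spec_delayed_recall_test (answer_new : List String) (out : Int) : Prop :=
  out = delayed_recall_test_alt answer_new
instance (answer_new : List String) (out : Int) : Decidable (Spec_delayed_recall_test answer_new out) := by
  unfold Spec_delayed_recall_test; infer_instance

-- ===== CLAIM (what is proved, stated in full; the proofs are below) =====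
def Claim_equal_delayed_recall_test : Prop := ∀ (answer_new : List String),
  Dom_delayed_recall_test answer_new → Pre_delayed_recall_test answer_new →
  Spec_delayed_recall_test answer_new (delayed_recall_test answer_new)

-- ===== LEMMAS AND PROOFS =====

-- indices (from start s) of the elements of xs that lie in drtText: the list_2 A builds
def selIdx (s : Int) : List String → List Int
  | [] => []
  | x :: r => if x ∈ drtText then s :: selIdx (s + 1) r else selIdx (s + 1) r

lemma loop1_eq (xs : List String) (s : Int) (l1 : List String) (l2 : List Int) (l3 : List String) :
    (PySem.List.enumerate xs s).foldl drtLoop1 (l1, l2, l3)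
      = (l1 ++ xs.filter (· ∈ drtText), l2 ++ selIdx s xs,
         l3 ++ (xs.filter (fun x => x ∉ drtText)).map (fun _ => "not in list")) := by
  induction xs generalizing s l1 l2 l3 with
  | nil => simp [PySem.List.enumerate_nil, selIdx]
  | cons x r ih =>
    rw [PySem.List.enumerate_cons]
    simp only [List.foldl_cons, drtLoop1, selIdx]
    by_cases hx : x ∈ drtText
    · simp [hx, ih, List.append_assoc]
    · simp [hx, ih, List.append_assoc]

lemma mem_selIdx {s : Int} {xs : List String} {i : Int} (h : i ∈ selIdx s xs) : s ≤ i := by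
  induction xs generalizing s with
  | nil => simp [selIdx] at h
  | cons x r ih =>
    simp only [selIdx] at h
    split at h
    · rcases List.mem_cons.1 h with rfl | h
      · exact le_refl _
      · linarith [ih h]
    · linarith [ih h]

lemma selIdx_pairwise (s : Int) (xs : List String) : (selIdx s xs).Pairwise (· < ·) := by
  induction xs generalizing s with
  | nil => simp [selIdx]
  | cons x r ih =>
    simp only [selIdx]
    split
    · exact List.Pairwise.cons (fun i hi => by linarith [mem_selIdx hi]) (ih _)
    · exact ih _

lemma selIdx_nil (s : Int) (xs : List String) (h : ∀ x ∈ xs, x ∉ drtText) : selIdx s xs = [] := by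
  induction xs generalizing s with
  | nil => rfl
  | cons x r ih =>
    simp only [selIdx, if_neg (h x (by simp))]
    exact ih _ (fun y hy => h y (by simp [hy]))

-- the dict-building loop over fresh distinct keys: its key list is exactly list_2
lemma keys_dict (l2 : List Int) (l1 : List String) (hnd : l2.Nodup) :
    ((PySem.List.pyRange 0 (l2.length : Int) 1).foldl
      (fun (d : PySem.Dict Int String) i =>
        d.insert (PySem.List.pyGetD l2 i 0) (PySem.List.pyGetD l1 i "")) PySem.Dict.empty).keys
      = l2 := by
  have h := PySem.Dict.items_foldl_insert_fresh (l := PySem.List.pyRange 0 (l2.length : Int) 1)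
      (k := fun i => PySem.List.pyGetD l2 i 0) (v := fun i => PySem.List.pyGetD l1 i "")
      (d := PySem.Dict.empty) ?_ ?_
  · simp only [PySem.Dict.keys, h]
    simp [List.map_map]
    exact PySem.List.map_pyGetD_pyRange_zero' l2 0
  · simp [PySem.Dict.contains_empty]
  · rw [PySem.List.map_pyGetD_pyRange_zero']; exact hnd

lemma drtStep_zero (v0 : String) (vr : List String) (j : Int) :
    drtStep (v0 :: vr) j 0 = if v0 = "banana" then j + 1 else j := by
  simp [drtStep, PySem.List.pyGet?, PySem.List.pyIdx?, drtText]

lemma drtStep_one (v0 v1 : String) (vr : List String) (j : Int) :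
    drtStep (v0 :: v1 :: vr) j 1 = if v1 = "milk" then j + 1 else j := by
  simp [drtStep, PySem.List.pyGet?, PySem.List.pyIdx?, drtText]

lemma drtStep_two (v0 v1 v2 : String) (vr : List String) (j : Int) :
    drtStep (v0 :: v1 :: v2 :: vr) j 2 = if v2 = "deer" then j + 1 else j := by
  simp [drtStep, PySem.List.pyGet?, PySem.List.pyIdx?, drtText,
        show (2:Int) ≤ (vr.length:Int)+1+1 from by omega]

-- A computes: fold the key loop over selIdx 0 value
lemma portA_eq (answer_new : List String) :
    delayed_recall_test answer_new
      = (selIdx 0 (answer_new.map (fun s => PySem.Str.strip (PySem.Str.lower s)))).foldl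
          (drtStep (answer_new.map (fun s => PySem.Str.strip (PySem.Str.lower s)))) 0 := by
  unfold delayed_recall_test
  simp only [loop1_eq, List.nil_append]
  rw [keys_dict _ _ ((selIdx_pairwise 0 _).imp ne_of_lt)]

theorem delayed_recall_test_spec : Claim_equal_delayed_recall_test := by
  intro answer_new _ hpre
  unfold Spec_delayed_recall_test
  rw [portA_eq]
  match answer_new with
  | [] => rfl
  | [x] =>
    simp only [List.map, delayed_recall_test_alt, List.zip_cons_cons, List.zip_nil_left,
               List.foldl_cons, List.foldl_nil, selIdx]
    by_cases hx : PySem.Str.strip (PySem.Str.lower x) ∈ drtText <;>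
      simp only [hx, if_true, if_false, List.foldl_cons, List.foldl_nil, drtStep_zero] <;>
      simp [drtText] at hx ⊢ <;> tauto
  | [x, y] =>
    simp only [List.map, delayed_recall_test_alt, List.zip_cons_cons, List.zip_nil_left,
               List.foldl_cons, List.foldl_nil, selIdx]
    by_cases hx : PySem.Str.strip (PySem.Str.lower x) ∈ drtText <;>
    by_cases hy : PySem.Str.strip (PySem.Str.lower y) ∈ drtText <;>
      simp only [hx, hy, if_true, if_false, zero_add, List.foldl_cons, List.foldl_nil,
                 drtStep_zero, drtStep_one] <;>
      simp [drtText] at hx hy ⊢ <;> first | (split_ifs <;> simp_all) | simp_all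
  | x :: y :: z :: r =>
    have hr : selIdx 3 (r.map (fun s => PySem.Str.strip (PySem.Str.lower s))) = [] := by
      apply selIdx_nil
      intro w hw
      rcases List.mem_map.1 hw with ⟨u, hu, rfl⟩
      exact hpre u (by simpa using hu)
    simp only [List.map, delayed_recall_test_alt, List.zip_cons_cons, List.zip_nil_right,
               List.foldl_cons, List.foldl_nil, selIdx]
    by_cases hx : PySem.Str.strip (PySem.Str.lower x) ∈ drtText <;>
    by_cases hy : PySem.Str.strip (PySem.Str.lower y) ∈ drtText <;>
    by_cases hz : PySem.Str.strip (PySem.Str.lower z) ∈ drtText <;>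
      simp only [hx, hy, hz, if_true, if_false, zero_add, one_add_one_eq_two,
                 show (2:Int)+1 = 3 from rfl, hr,
                 List.foldl_cons, List.foldl_nil,
                 drtStep_zero, drtStep_one, drtStep_two] <;>
      simp [drtText] at hx hy hz ⊢ <;> first | (split_ifs <;> simp_all) | simp_all
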